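-- pv_equiv track=rewrite | github.com/amsharma23/Yeast-MM-Image-analysis | Image_analysis/Segmentation_analysis/trap_ex_func.py | getmtimeframes
-- ===== SOURCE A (Python) =====
-- def getmtimeframes(roi_od): #gets segemented cells in multiple time frames; from Fiji plugin output
--
--     unique_keys =[];
--     tim_f = {};
--     ml_t = [];
--     roi_ret ={};
--     for el in roi_od.keys():
--         if (el.split(":")[0] not in unique_keys):
--             unique_keys.append(el.split(":")[0]);
--             tim_f[el.split(":")[0]] = 1;
--         else:
--             tim_f[el.split(":")[0]] +=1;
--
--
--     for el in tim_f.keys():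
--         if(tim_f[el] > 1):
--             ml_t.append(el);
--
--
--     for el in roi_od.keys():
--         if(el.split(":")[0] in ml_t):
--             roi_ret[el] = roi_od[el];
--     return(roi_ret)
-- ===== SOURCE B (Python) =====
-- def getmtimeframes(roi_od):
--     ps = sorted(k.split(":")[0] for k in roi_od)
--     multi = {a for a, b in zip(ps, ps[1:]) if a == b}
--     return {k: v for k, v in roi_od.items() if k.split(":")[0] in multi}
-- ===== Notes on version B (the rewrite author's own statement) =====
-- stated objective: faster
-- what changed: instead of A's counting passes (unique_keys list scans and a tim_f counter dict), B sorts the prefixes and detects repeated prefixes as adjacent equal pairs in the sorted list, then filters the dict once by membership in that set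
import Mathlib
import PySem

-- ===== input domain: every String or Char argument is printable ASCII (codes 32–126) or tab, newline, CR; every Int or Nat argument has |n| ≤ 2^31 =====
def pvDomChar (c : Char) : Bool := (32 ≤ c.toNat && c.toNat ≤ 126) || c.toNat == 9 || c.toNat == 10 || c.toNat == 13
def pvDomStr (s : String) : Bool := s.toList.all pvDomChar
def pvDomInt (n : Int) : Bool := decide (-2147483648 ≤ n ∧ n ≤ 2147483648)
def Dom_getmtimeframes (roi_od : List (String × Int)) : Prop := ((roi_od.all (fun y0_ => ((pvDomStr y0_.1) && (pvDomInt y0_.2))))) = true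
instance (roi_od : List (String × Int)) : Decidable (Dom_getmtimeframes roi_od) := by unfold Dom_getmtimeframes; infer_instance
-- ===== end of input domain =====

-- B replaces A's counting passes by sorting the prefixes and detecting repeated prefixes
-- as adjacent equal pairs in the sorted list (objective: faster).

-- shared helper: el.split(":")[0]  (split with the non-empty separator ":" never yields an empty list, so [0] is its head)
def pvPrefix (el : String) : String := (((PySem.Str.split? el ":").getD []).headD "")

-- ===== PORT A =====
def getmtimeframes (roi_od : List (String × Int)) : List (String × Int) :=
  let d := PySem.Dict.ofList roi_od
  let st := d.keys.foldl (fun (st : List String × PySem.Dict String Int) el =>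
      if pvPrefix el ∈ st.1 then (st.1, st.2.modify (pvPrefix el) 0 (· + 1))
      else (st.1 ++ [pvPrefix el], st.2.insert (pvPrefix el) 1)) ([], PySem.Dict.empty)
  let tim_f := st.2
  let ml_t := tim_f.keys.foldl (fun acc el => if 1 < tim_f.getD el 0 then acc ++ [el] else acc) []
  let roi_ret := d.keys.foldl (fun (r : PySem.Dict String Int) el =>
      if pvPrefix el ∈ ml_t then r.insert el (d.getD el 0) else r) PySem.Dict.empty
  roi_ret.items

-- ===== PORT B =====
def getmtimeframes_alt (roi_od : List (String × Int)) : List (String × Int) :=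
  let d := PySem.Dict.ofList roi_od
  let ps := PySem.List.sorted (d.keys.map pvPrefix) (fun x => x) false
  let multi : PySem.Set String := (ps.zip (PySem.List.slice ps (some 1) none)).foldl
      (fun (s : PySem.Set String) ab => if ab.1 = ab.2 then PySem.Set.add s ab.1 else s)
      PySem.Set.empty
  (d.items.foldl (fun (r : PySem.Dict String Int) kv =>
      if pvPrefix kv.1 ∈ multi then r.insert kv.1 kv.2 else r) PySem.Dict.empty).items

-- ===== PRECONDITION & SPEC =====
def Spec_getmtimeframes (roi_od : List (String × Int)) (out : List (String × Int)) : Prop := out = getmtimeframes_alt roi_od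
instance (roi_od : List (String × Int)) (out : List (String × Int)) : Decidable (Spec_getmtimeframes roi_od out) := by unfold Spec_getmtimeframes; infer_instance

-- ===== CLAIM =====
def Claim_equal_getmtimeframes : Prop := ∀ (roi_od : List (String × Int)), Dom_getmtimeframes roi_od → Spec_getmtimeframes roi_od (getmtimeframes roi_od)

-- ===== LEMMAS AND PROOFS =====

-- A's first loop: tim_f is the counter of the prefixes seen so far.
lemma loop1_getD (l : List String) (uk : List String) (tf : PySem.Dict String Int)
    (h : uk = tf.keys) (q : String) :
    ((l.foldl (fun (st : List String × PySem.Dict String Int) el =>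
      if pvPrefix el ∈ st.1 then (st.1, st.2.modify (pvPrefix el) 0 (· + 1))
      else (st.1 ++ [pvPrefix el], st.2.insert (pvPrefix el) 1)) (uk, tf)).2).getD q 0
    = tf.getD q 0 + ((l.map pvPrefix).count q : Int) := by
  induction l generalizing uk tf with
  | nil => simp
  | cons el t ih =>
    rw [List.foldl_cons]
    by_cases hm : pvPrefix el ∈ uk
    · dsimp only
      rw [if_pos hm]
      have hc : tf.contains (pvPrefix el) = true :=
        (PySem.Dict.contains_iff_mem_keys tf _).mpr (h ▸ hm)
      have h' : uk = (tf.modify (pvPrefix el) 0 (· + 1)).keys := by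
        rw [PySem.Dict.keys_modify, PySem.Dict.keys_insert_of_contains _ _ hc, h]
      rw [ih _ _ h', PySem.Dict.getD_modify]
      simp only [List.map_cons, List.count_cons, beq_iff_eq]
      rcases eq_or_ne q (pvPrefix el) with he | he
      · subst he
        rw [if_pos rfl, if_pos rfl]
        push_cast
        omega
      · rw [if_neg he, if_neg (Ne.symm he)]
        push_cast
        omega
    · dsimp only
      rw [if_neg hm]
      have hc : tf.contains (pvPrefix el) = false := by
        cases hcc : tf.contains (pvPrefix el)
        · rfl
        · have hk : pvPrefix el ∈ tf.keys := (PySem.Dict.contains_iff_mem_keys tf _).mp hcc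
          rw [← h] at hk
          exact absurd hk hm
      have h' : uk ++ [pvPrefix el] = (tf.insert (pvPrefix el) 1).keys := by
        rw [PySem.Dict.keys_insert_of_not_contains _ _ hc, h]
      rw [ih _ _ h', PySem.Dict.getD_insert]
      simp only [List.map_cons, List.count_cons, beq_iff_eq]
      rcases eq_or_ne q (pvPrefix el) with he | he
      · subst he
        rw [if_pos rfl, if_pos rfl, PySem.Dict.getD_of_not_contains _ _ hc]
        push_cast
        omega
      · rw [if_neg he, if_neg (Ne.symm he)]
        push_cast
        omega

-- B's set-comprehension fold over the adjacent pairs: membership characterisation.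
lemma mem_multiFold (pairs : List (String × String)) (s0 : PySem.Set String) (q : String) :
    q ∈ pairs.foldl (fun (s : PySem.Set String) ab =>
        if ab.1 = ab.2 then PySem.Set.add s ab.1 else s) s0
    ↔ q ∈ s0 ∨ ∃ ab ∈ pairs, ab.1 = ab.2 ∧ ab.1 = q := by
  induction pairs generalizing s0 with
  | nil => simp
  | cons ab t ih =>
    rw [List.foldl_cons]
    by_cases he : ab.1 = ab.2
    · rw [if_pos he, ih]
      rw [PySem.Set.mem_add]
      constructor
      · rintro (⟨hs | hq⟩ | ⟨cd, hcd, h1, h2⟩)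
        · exact Or.inl hs
        · exact Or.inr ⟨ab, List.mem_cons_self, he, hq.symm⟩
        · exact Or.inr ⟨cd, List.mem_cons_of_mem _ hcd, h1, h2⟩
      · rintro (hs | ⟨cd, hcd, h1, h2⟩)
        · exact Or.inl (Or.inl hs)
        · rcases List.mem_cons.mp hcd with rfl | hm
          · exact Or.inl (Or.inr h2.symm)
          · exact Or.inr ⟨cd, hm, h1, h2⟩
    · rw [if_neg he, ih]
      constructor
      · rintro (hs | ⟨cd, hcd, h1, h2⟩)
        · exact Or.inl hs
        · exact Or.inr ⟨cd, List.mem_cons_of_mem _ hcd, h1, h2⟩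
      · rintro (hs | ⟨cd, hcd, h1, h2⟩)
        · exact Or.inl hs
        · rcases List.mem_cons.mp hcd with rfl | hm
          · exact absurd h1 he
          · exact Or.inr ⟨cd, hm, h1, h2⟩

-- In a (≤)-sorted list, an element repeats iff it occurs in an adjacent equal pair.
lemma adj_pair_iff_count (l : List String) (hs : l.Pairwise (· ≤ ·)) (q : String) :
    (∃ ab ∈ l.zip l.tail, ab.1 = ab.2 ∧ ab.1 = q) ↔ 1 < l.count q := by
  induction l with
  | nil => simp
  | cons a t ih =>
    rcases List.pairwise_cons.mp hs with ⟨hall, ht⟩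
    cases t with
    | nil =>
      simp [List.count_cons]
      split <;> omega
    | cons b t' =>
      have hzip : (a :: b :: t').zip (a :: b :: t').tail
          = (a, b) :: ((b :: t').zip (b :: t').tail) := by simp
      have hcnt : (a :: b :: t').count q
          = t'.count q + (if b = q then 1 else 0) + (if a = q then 1 else 0) := by
        simp [List.count_cons]
      have hcnt' : (b :: t').count q = t'.count q + (if b = q then 1 else 0) := by
        simp [List.count_cons]
      rw [hzip, hcnt]
      constructor
      · rintro ⟨ab, hm, h1, h2⟩
        rcases List.mem_cons.mp hm with rfl | hm'
        · have h1' : a = b := h1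
          have h2' : a = q := h2
          rw [if_pos (h1'.symm.trans h2'), if_pos h2']
          omega
        · have := (ih ht).mp ⟨ab, hm', h1, h2⟩
          rw [hcnt'] at this
          omega
      · intro hc
        by_cases ha : a = q
        · -- q occurs in the tail too; sortedness forces b = q
          rw [if_pos ha] at hc
          have htc : 0 < (b :: t').count q := by rw [hcnt']; omega
          have hqmem : q ∈ b :: t' := List.count_pos_iff.mp htc
          have hbq : b = q := by
            rcases List.mem_cons.mp hqmem with rfl | hq'
            · rfl
            · have h1 : b ≤ q := (List.pairwise_cons.mp ht).1 q hq'
              have h2 : q ≤ b := ha ▸ hall b List.mem_cons_self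
              exact le_antisymm h1 h2
          exact ⟨(a, b), List.mem_cons_self, by rw [ha, hbq], ha⟩
        · rw [if_neg ha] at hc
          have htc : 1 < (b :: t').count q := by rw [hcnt']; omega
          rcases (ih ht).mpr htc with ⟨ab, hm, h1, h2⟩
          exact ⟨ab, List.mem_cons_of_mem _ hm, h1, h2⟩

lemma ports_eq (roi_od : List (String × Int)) :
    getmtimeframes roi_od = getmtimeframes_alt roi_od := by
  unfold getmtimeframes getmtimeframes_alt
  dsimp only
  have hnd : (PySem.Dict.ofList roi_od).keys.Nodup := PySem.Dict.nodup_keys_ofList roi_od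
  set d := PySem.Dict.ofList roi_od with hd
  set ks := d.keys with hks
  -- tim_f counts prefixes
  have htf : ∀ q, ((ks.foldl (fun (st : List String × PySem.Dict String Int) el =>
      if pvPrefix el ∈ st.1 then (st.1, st.2.modify (pvPrefix el) 0 (· + 1))
      else (st.1 ++ [pvPrefix el], st.2.insert (pvPrefix el) 1)) ([], PySem.Dict.empty)).2).getD q 0
      = ((ks.map pvPrefix).count q : Int) := by
    intro q
    have h0 : ([] : List String) = (PySem.Dict.empty : PySem.Dict String Int).keys := by
      simp
    simpa using loop1_getD ks [] PySem.Dict.empty h0 q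
  -- B's sorted-adjacency set holds exactly the prefixes with count > 1
  have hmulti : ∀ q, (q ∈ (((PySem.List.sorted (ks.map pvPrefix) (fun x => x) false).zip
        (PySem.List.slice (PySem.List.sorted (ks.map pvPrefix) (fun x => x) false) (some 1) none)).foldl
        (fun (s : PySem.Set String) ab => if ab.1 = ab.2 then PySem.Set.add s ab.1 else s)
        PySem.Set.empty))
      ↔ 1 < (ks.map pvPrefix).count q := by
    intro q
    set sl := PySem.List.sorted (ks.map pvPrefix) (fun x => x) false with hsl
    rw [PySem.List.slice_from_one, mem_multiFold]
    have hpw : sl.Pairwise (· ≤ ·) := by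
      have := PySem.List.sorted_pairwise (ks.map pvPrefix) (fun x => x) 
      simpa [hsl] using this
    have hperm : sl.Perm (ks.map pvPrefix) := PySem.List.sorted_perm _ _ _
    rw [show (q ∈ (PySem.Set.empty : PySem.Set String)) = False by simp [PySem.Set.empty]]
    rw [adj_pair_iff_count sl hpw q, hperm.count_eq]
    simp
  -- ml_t membership is exactly "prefix count > 1"
  have hml : ∀ q, (q ∈ ((ks.foldl (fun (st : List String × PySem.Dict String Int) el =>
      if pvPrefix el ∈ st.1 then (st.1, st.2.modify (pvPrefix el) 0 (· + 1))
      else (st.1 ++ [pvPrefix el], st.2.insert (pvPrefix el) 1)) ([], PySem.Dict.empty)).2.keys.foldl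
        (fun acc el => if 1 < ((ks.foldl (fun (st : List String × PySem.Dict String Int) el =>
          if pvPrefix el ∈ st.1 then (st.1, st.2.modify (pvPrefix el) 0 (· + 1))
          else (st.1 ++ [pvPrefix el], st.2.insert (pvPrefix el) 1)) ([], PySem.Dict.empty)).2).getD el 0
          then acc ++ [el] else acc) []))
      ↔ 1 < ((ks.map pvPrefix).count q : Int) := by
    intro q
    rw [PySem.List.foldl_append_ite_eq_filter]
    constructor
    · intro hmem
      rcases List.mem_filter.mp hmem with ⟨_, hdec⟩
      have := of_decide_eq_true hdec
      rwa [htf q] at this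
    · intro hq
      refine List.mem_filter.mpr ⟨?_, by rw [htf q]; exact decide_eq_true hq⟩
      apply (PySem.Dict.contains_iff_mem_keys _ _).mp
      cases hcc : ((ks.foldl (fun (st : List String × PySem.Dict String Int) el =>
          if pvPrefix el ∈ st.1 then (st.1, st.2.modify (pvPrefix el) 0 (· + 1))
          else (st.1 ++ [pvPrefix el], st.2.insert (pvPrefix el) 1)) ([], PySem.Dict.empty)).2).contains q
      · have h0 := PySem.Dict.getD_of_not_contains _ (0 : Int) hcc
        rw [htf q] at h0
        omega
      · rfl
  -- rewrite B's items pass as a pass over the keys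
  rw [PySem.Dict.items_eq_map_keys d hnd (0 : Int), List.foldl_map, ← hks]
  refine congrArg PySem.Dict.items ?_
  apply PySem.List.foldl_congr_mem
  intro r el _
  dsimp only
  by_cases hq : 1 < ((ks.map pvPrefix).count (pvPrefix el) : Int)
  · rw [if_pos ((hml _).mpr hq), if_pos ((hmulti _).mpr (by exact_mod_cast hq))]
  · rw [if_neg (fun hmem => hq ((hml _).mp hmem)),
        if_neg (fun hmem => hq (by exact_mod_cast (hmulti _).mp hmem))]

-- ===== VERDICT =====
theorem getmtimeframes_spec : Claim_equal_getmtimeframes := by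
  intro roi_od _
  unfold Spec_getmtimeframes
  exact ports_eq roi_od
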